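-- pv_equiv track=rewrite | github.com/ilyakutilin/trslagent | src/translator.py | _find_seam
-- ===== SOURCE A (Python) =====
-- def _find_seam(tail: str, head: str) -> int:
--     """
--     Returns the character offset in `head` where unique content begins,
--     i.e. skips any content that is duplicated from `tail`.
--     Tries progressively smaller suffixes of `tail` against the prefix of `head`.
--     """
--     words = tail.split()
--     # Try matching the last N words of tail against start of head
--     for n in range(min(20, len(words)), 2, -1):
--         snippet = " ".join(words[-n:])
--         idx = head.find(snippet)
--         if idx != -1:
--             return idx + len(snippet)
--     return 0  # no overlap found, just concatenate
-- ===== SOURCE B (Python) =====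
-- def _find_seam(tail: str, head: str) -> int:
--     words = tail.split()
--     limit = min(20, len(words))
--     best = 0
--     snippet = ""
--     # Grow the candidate snippet one word at a time from the end of tail.
--     # "the last n words of tail occur in head" is monotone in n (the n-1-word
--     # snippet is a suffix of the n-word snippet), so the matching lengths form
--     # a downward-closed set: stop at the first failure, and the offset recorded
--     # for the longest matching snippet so far is the answer.
--     for n in range(1, limit + 1):
--         w = words[-n]
--         snippet = w if n == 1 else w + " " + snippet
--         if n < 3:
--             continue
--         idx = head.find(snippet)
--         if idx == -1:
--             break
--         best = idx + len(snippet)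
--     return best
-- ===== Notes on version B (the rewrite author's own statement) =====
-- stated objective: alternative
-- what changed: B replaces A's descending scan that re-joins a fresh snippet per candidate length with an ascending pass that grows one snippet incrementally word by word and breaks at the first length whose snippet is absent from head, relying on the fact that matching lengths are downward closed (the n-1-word snippet is a suffix of the n-word snippet).
import Mathlib
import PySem

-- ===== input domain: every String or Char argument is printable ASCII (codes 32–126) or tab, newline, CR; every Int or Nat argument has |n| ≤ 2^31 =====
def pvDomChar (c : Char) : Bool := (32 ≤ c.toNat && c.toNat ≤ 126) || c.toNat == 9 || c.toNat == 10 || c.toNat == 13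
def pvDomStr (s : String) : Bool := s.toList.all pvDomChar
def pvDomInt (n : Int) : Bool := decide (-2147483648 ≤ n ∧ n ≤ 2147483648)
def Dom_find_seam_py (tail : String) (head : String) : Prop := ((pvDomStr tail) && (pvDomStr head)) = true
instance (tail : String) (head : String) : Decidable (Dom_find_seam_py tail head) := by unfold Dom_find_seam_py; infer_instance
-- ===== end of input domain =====

-- B grows the candidate snippet incrementally word by word from the end of tail and
-- stops at the first length that fails to occur in head (matching lengths are
-- downward closed), instead of A's descending rescan with early return on success.

-- ===== PORT A =====
-- for n in range(min(20, len(words)), 2, -1): return at the first match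
def seamLoopA (words : List String) (head : String) : List Int → Int
  | [] => 0
  | n :: rest =>
    let snippet := PySem.Str.join " " (PySem.List.slice words (some (-n)) none)
    let idx := PySem.Str.find head snippet
    if idx ≠ -1 then idx + PySem.Str.len snippet else seamLoopA words head rest

def find_seam_py (tail : String) (head : String) : Int :=
  let words := PySem.Str.split₀ tail
  seamLoopA words head (PySem.List.pyRange (min 20 (words.length : Int)) 2 (-1))

-- ===== PORT B =====
-- for n in range(1, limit + 1): grow the snippet by one word, record the match,
-- break at the first failure.  words.getD (words.length - n) "" is words[-n]:
-- inside the loop 1 ≤ n ≤ limit ≤ len(words), so the Python index is in range.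
def seamLoopB (words : List String) (hd : List Char) (limit : Nat)
    (n : Nat) (best : Int) (snippet : List Char) : Int :=
  if _h : limit + 1 ≤ n then best
  else
    let w := (words.getD (words.length - n) "").toList
    let snippet' := if n = 1 then w else w ++ [' '] ++ snippet
    if n < 3 then seamLoopB words hd limit (n + 1) best snippet'
    else
      let idx := PySem.Chars.find hd snippet'
      if idx = -1 then best
      else seamLoopB words hd limit (n + 1) (idx + (snippet'.length : Int)) snippet'
  termination_by limit + 1 - n
  decreasing_by all_goals omega

def find_seam_py_alt (tail : String) (head : String) : Int :=
  let words := PySem.Str.split₀ tail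
  seamLoopB words head.toList (min 20 words.length) 1 0 []

-- ===== PRECONDITION & SPEC =====
def Spec_find_seam_py (tail : String) (head : String) (out : Int) : Prop := out = find_seam_py_alt tail head
instance (tail : String) (head : String) (out : Int) : Decidable (Spec_find_seam_py tail head out) := by unfold Spec_find_seam_py; infer_instance

-- ===== CLAIM (what is proved, stated in full; the proofs are below) =====
def Claim_equal_find_seam_py : Prop := ∀ (tail : String) (head : String), Dom_find_seam_py tail head → Spec_find_seam_py tail head (find_seam_py tail head)

-- ===== LEMMAS AND PROOFS =====

-- canonical snippet: " ".join(words[-n:]) as a character list (1 ≤ n)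
def sfx (words : List String) (n : Nat) : List Char :=
  PySem.Chars.join [' '] ((words.drop (words.length - n)).map String.toList)

-- Bool predicate "n is a candidate length and its snippet occurs in hd"
def seamHit (words : List String) (hd : List Char) (n : Nat) : Bool :=
  decide (3 ≤ n) && (PySem.Chars.find hd (sfx words n) != -1)

-- the value A returns for a matching length n
def ansAt (words : List String) (hd : List Char) (n : Nat) : Int :=
  PySem.Chars.find hd (sfx words n) + ((sfx words n).length : Int)

-- reference value: answer of the greatest matching length ≤ k, else 0
def seamRef (words : List String) (hd : List Char) (k : Nat) : Int :=
  let g := Nat.findGreatest (fun n => seamHit words hd n = true) k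
  if g = 0 then 0 else ansAt words hd g

lemma sfx_one (words : List String) (h : 1 ≤ words.length) :
    sfx words 1 = (words.getD (words.length - 1) "").toList := by
  have h1 : words.length - 1 < words.length := by omega
  unfold sfx
  rw [List.drop_eq_getElem_cons h1, show words.length - 1 + 1 = words.length from by omega,
    List.drop_length, List.map_cons, List.map_nil, PySem.Chars.join_singleton,
    List.getD_eq_getElem words "" h1]

lemma sfx_succ (words : List String) (n : Nat) (h1 : 1 ≤ n) (h2 : n + 1 ≤ words.length) :
    sfx words (n + 1) =
      (words.getD (words.length - (n + 1)) "").toList ++ [' '] ++ sfx words n := by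
  have hi : words.length - (n + 1) < words.length := by omega
  have hne : words.length - n < words.length := by omega
  have key : words.drop (words.length - (n + 1)) =
      words[words.length - (n + 1)] :: words.drop (words.length - n) := by
    rw [List.drop_eq_getElem_cons hi, show words.length - (n + 1) + 1 = words.length - n from by omega]
  unfold sfx
  rw [key]
  obtain ⟨y, ys, hys⟩ : ∃ y ys, words.drop (words.length - n) = y :: ys := by
    cases hd : words.drop (words.length - n) with
    | nil => exfalso; have := congrArg List.length hd; simp at this; omega
    | cons y ys => exact ⟨y, ys, rfl⟩
  rw [hys, List.map_cons, List.map_cons, PySem.Chars.join_cons_cons, ← List.map_cons, ← hys,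
    List.getD_eq_getElem words "" hi]

lemma sfx_suffix (words : List String) (n : Nat) (h1 : 1 ≤ n) (h2 : n + 1 ≤ words.length) :
    sfx words n <:+ sfx words (n + 1) := by
  rw [sfx_succ words n h1 h2]
  exact ⟨_, rfl⟩

lemma hit_mono (words : List String) (hd : List Char) (n : Nat)
    (h1 : 1 ≤ n) (h2 : n + 1 ≤ words.length)
    (h : PySem.Chars.find hd (sfx words (n + 1)) ≠ -1) :
    PySem.Chars.find hd (sfx words n) ≠ -1 := by
  rw [PySem.Chars.find_ne_neg_one_iff] at h ⊢
  exact ((sfx_suffix words n h1 h2).isInfix).trans h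

lemma hit_chain (words : List String) (hd : List Char) :
    ∀ m n : Nat, 1 ≤ n → n ≤ m → m ≤ words.length →
      PySem.Chars.find hd (sfx words m) ≠ -1 → PySem.Chars.find hd (sfx words n) ≠ -1 := by
  intro m
  induction m with
  | zero => intro n h1 h2 _ h; omega
  | succ k ih =>
    intro n h1 h2 hL h
    rcases Nat.lt_or_ge n (k + 1) with hlt | hge
    · exact ih n h1 (by omega) (by omega) (hit_mono words hd k (by omega) hL h)
    · have : n = k + 1 := by omega
      rw [this]; exact h

-- A's snippet at length n is the canonical one
lemma aSnippet (words : List String) (n : Nat) (h : 1 ≤ n) :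
    (PySem.Str.join " " (PySem.List.slice words (some (-(n : Int))) none)).toList
      = sfx words n := by
  rw [PySem.Str.toList_join, PySem.List.slice_from_neg_natCast words n h]
  rfl

-- A's descending loop over [3..k] computes the reference value
lemma aLoop_eq (words : List String) (head : String) :
    ∀ k : Nat, k ≤ words.length →
      seamLoopA words head ((PySem.List.pyRange 3 ((k : Int) + 1) 1).reverse)
        = seamRef words head.toList k := by
  intro k
  induction k with
  | zero =>
    intro _
    rw [PySem.List.pyRange_one_eq_nil (by omega)]
    simp [seamLoopA, seamRef]
  | succ m ih =>
    intro hL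
    by_cases h3 : 3 ≤ m + 1
    · have hsplit : PySem.List.pyRange 3 ((↑(m + 1) : Int) + 1) 1
          = PySem.List.pyRange 3 ((m : Int) + 1) 1 ++ [((m + 1 : Nat) : Int)] := by
        rw [PySem.List.pyRange_one_append 3 ((m : Int) + 1) ((↑(m + 1) : Int) + 1)
          (by omega) (by omega)]
        congr 1
        rw [PySem.List.pyRange_one_cons (by push_cast; omega),
          PySem.List.pyRange_one_eq_nil (by push_cast; omega)]
        push_cast; norm_num
      rw [hsplit, List.reverse_append, List.reverse_singleton, List.singleton_append]
      show (let snippet := PySem.Str.join " "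
              (PySem.List.slice words (some (-((m + 1 : Nat) : Int))) none)
            let idx := PySem.Str.find head snippet
            if idx ≠ -1 then idx + PySem.Str.len snippet
            else seamLoopA words head ((PySem.List.pyRange 3 ((m : Int) + 1) 1).reverse)) = _
      have hsn : (PySem.Str.join " "
          (PySem.List.slice words (some (-((m + 1 : Nat) : Int))) none)).toList
            = sfx words (m + 1) := aSnippet words (m + 1) (by omega)
      have hidx : PySem.Str.find head (PySem.Str.join " "
          (PySem.List.slice words (some (-((m + 1 : Nat) : Int))) none))
            = PySem.Chars.find head.toList (sfx words (m + 1)) := by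
        rw [PySem.Str.find_eq, hsn]
      by_cases hfound : PySem.Chars.find head.toList (sfx words (m + 1)) ≠ -1
      · have hP : seamHit words head.toList (m + 1) = true := by
          unfold seamHit
          simp [h3, hfound]
        have hg : Nat.findGreatest (fun n => seamHit words head.toList n = true) (m + 1)
            = m + 1 := by
          rw [Nat.findGreatest_succ, if_pos hP]
        simp only [hidx, if_pos hfound]
        unfold seamRef
        rw [hg, if_neg (by omega)]
        unfold ansAt
        rw [PySem.Str.len_eq, hsn]
      · have hP : ¬ seamHit words head.toList (m + 1) = true := by
          unfold seamHit
          simp only [not_not] at hfound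
          simp [hfound]
        have hg : Nat.findGreatest (fun n => seamHit words head.toList n = true) (m + 1)
            = Nat.findGreatest (fun n => seamHit words head.toList n = true) m := by
          rw [Nat.findGreatest_succ, if_neg hP]
        simp only [hidx, if_neg hfound]
        rw [ih (by omega)]
        unfold seamRef
        rw [hg]
    · -- m + 1 ≤ 2: empty range, and no candidate length ≤ 2
      rw [PySem.List.pyRange_one_eq_nil (by push_cast; omega)]
      have hg : Nat.findGreatest (fun n => seamHit words head.toList n = true) (m + 1) = 0 := by
        rw [Nat.findGreatest_eq_zero_iff]
        intro n _ hn
        unfold seamHit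
        simp only [Bool.and_eq_true, decide_eq_true_eq, not_and]
        intro h3n; omega
      simp [seamLoopA, seamRef, hg]

-- exit state of B's loop: all lengths in [3, n) matched and n = limit + 1
lemma bExit (words : List String) (hd : List Char) (Nn : Nat) (_hN : Nn ≤ words.length)
    (n : Nat) (best : Int) (hn3 : 3 ≤ n) (hEq : n = Nn + 1)
    (hall : ∀ m, 3 ≤ m → m < n → PySem.Chars.find hd (sfx words m) ≠ -1)
    (hbest : best = if 4 ≤ n then ansAt words hd (n - 1) else 0) :
    best = seamRef words hd Nn := by
  by_cases h4 : 4 ≤ n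
  · have hNn3 : 3 ≤ Nn := by omega
    have hP : seamHit words hd Nn = true := by
      unfold seamHit
      simp [hNn3, hall Nn hNn3 (by omega)]
    have hg : Nat.findGreatest (fun k => seamHit words hd k = true) Nn = Nn := by
      rw [Nat.findGreatest_eq_iff]
      exact ⟨le_refl _, fun _ => hP, fun k hk1 hk2 => by omega⟩
    unfold seamRef
    rw [hg, if_neg (by omega), hbest, if_pos h4, hEq]
    simp
  · have hNn : Nn = 2 := by omega
    have hg : Nat.findGreatest (fun k => seamHit words hd k = true) Nn = 0 := by
      rw [Nat.findGreatest_eq_zero_iff]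
      intro k hk1 hk2
      unfold seamHit
      simp only [Bool.and_eq_true, decide_eq_true_eq, not_and]
      intro h3k; omega
    unfold seamRef
    rw [hg, if_pos rfl, hbest, if_neg h4]

-- B's loop from state n computes the reference value
lemma bLoop_eq (words : List String) (hd : List Char) (Nn : Nat) (hN : Nn ≤ words.length) :
    ∀ fuel n best, Nn + 1 - n ≤ fuel → 3 ≤ n → n ≤ Nn + 1 →
      (∀ m, 3 ≤ m → m < n → PySem.Chars.find hd (sfx words m) ≠ -1) →
      best = (if 4 ≤ n then ansAt words hd (n - 1) else 0) →
      seamLoopB words hd Nn n best (sfx words (n - 1)) = seamRef words hd Nn := by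
  intro fuel
  induction fuel with
  | zero =>
    intro n best hfuel hn3 hnN hall hbest
    have hEq : n = Nn + 1 := by omega
    rw [seamLoopB, dif_pos (by omega)]
    exact bExit words hd Nn hN n best hn3 hEq hall hbest
  | succ f ih =>
    intro n best hfuel hn3 hnN hall hbest
    by_cases hstop : Nn + 1 ≤ n
    · rw [seamLoopB, dif_pos hstop]
      exact bExit words hd Nn hN n best hn3 (by omega) hall hbest
    · rw [seamLoopB, dif_neg hstop]
      have hnL : n ≤ words.length := by omega
      have hsn : (if n = 1 then (words.getD (words.length - n) "").toList
          else (words.getD (words.length - n) "").toList ++ [' '] ++ sfx words (n - 1))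
            = sfx words n := by
        rw [if_neg (by omega)]
        have := sfx_succ words (n - 1) (by omega) (by omega)
        rw [show n - 1 + 1 = n from by omega] at this
        rw [this]
      simp only [if_neg (show ¬ n < 3 from by omega), hsn]
      by_cases hfound : PySem.Chars.find hd (sfx words n) = -1
      · rw [if_pos hfound]
        -- no length ≥ n can match
        have hnone : ∀ k, n ≤ k → k ≤ Nn → ¬ seamHit words hd k = true := by
          intro k hk1 hk2 hP
          unfold seamHit at hP
          simp only [Bool.and_eq_true, decide_eq_true_eq, bne_iff_ne, ne_eq] at hP
          exact hit_chain words hd k n (by omega) hk1 (by omega) hP.2 hfound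
        by_cases h4 : 4 ≤ n
        · have hP : seamHit words hd (n - 1) = true := by
            unfold seamHit
            simp [show 3 ≤ n - 1 from by omega, hall (n - 1) (by omega) (by omega)]
          have hg : Nat.findGreatest (fun k => seamHit words hd k = true) Nn = n - 1 := by
            rw [Nat.findGreatest_eq_iff]
            refine ⟨by omega, fun _ => hP, fun k hk1 hk2 => hnone k (by omega) hk2⟩
          unfold seamRef
          rw [hg, if_neg (by omega), hbest, if_pos h4]
        · have hg : Nat.findGreatest (fun k => seamHit words hd k = true) Nn = 0 := by
            rw [Nat.findGreatest_eq_zero_iff]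
            intro k hk1 hk2
            by_cases h3k : 3 ≤ k
            · exact hnone k (by omega) hk2
            · unfold seamHit
              simp only [Bool.and_eq_true, decide_eq_true_eq, not_and]
              intro; omega
          unfold seamRef
          rw [hg, if_pos rfl, hbest, if_neg h4]
      · rw [if_neg hfound]
        have hrec := ih (n + 1) (PySem.Chars.find hd (sfx words n) + ((sfx words n).length : Int))
          (by omega) (by omega) (by omega)
          (fun m hm1 hm2 => by
            rcases Nat.lt_or_ge m n with hlt | hge
            · exact hall m hm1 hlt
            · have : m = n := by omega
              rwa [this])
          (by rw [if_pos (by omega)]; rfl)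
        rw [show n + 1 - 1 = n from by omega] at hrec
        exact hrec

-- no candidate length is ≤ 2, so the reference value is 0 for small bounds
lemma seamRef_small (words : List String) (hd : List Char) (k : Nat) (hk : k ≤ 2) :
    seamRef words hd k = 0 := by
  have hg : Nat.findGreatest (fun n => seamHit words hd n = true) k = 0 := by
    rw [Nat.findGreatest_eq_zero_iff]
    intro n _ hn
    unfold seamHit
    simp only [Bool.and_eq_true, decide_eq_true_eq, not_and]
    intro; omega
  unfold seamRef
  simp [hg]

-- ===== VERDICT (by name: the statement is the Claim_ definition above) =====
theorem find_seam_py_spec : Claim_equal_find_seam_py := by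
  intro tail head _
  unfold Spec_find_seam_py find_seam_py find_seam_py_alt
  set words := PySem.Str.split₀ tail with hw
  set Nn := min 20 words.length with hNn
  have hNL : Nn ≤ words.length := Nat.min_le_right _ _
  have hcast : min 20 (words.length : Int) = ((Nn : Nat) : Int) := by
    rw [hNn]; push_cast; rfl
  have hA : seamLoopA words head (PySem.List.pyRange (min 20 (words.length : Int)) 2 (-1))
      = seamRef words head.toList Nn := by
    rw [hcast, PySem.List.pyRange_neg_one_eq_reverse,
      show (2 : Int) + 1 = 3 from rfl]
    exact aLoop_eq words head Nn hNL
  have hB : seamLoopB words head.toList Nn 1 0 [] = seamRef words head.toList Nn := by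
    rcases Nat.lt_or_ge Nn 1 with h0 | h1
    · rw [seamLoopB, dif_pos (by omega)]
      rw [seamRef_small words head.toList Nn (by omega)]
    · rw [seamLoopB, dif_neg (by omega)]
      norm_num
      have hs1 : (words[words.length - 1]?.getD "").toList = sfx words 1 := by
        rw [← List.getD_eq_getElem?_getD]
        exact (sfx_one words (by omega)).symm
      rw [hs1]
      rcases Nat.lt_or_ge Nn 2 with h1' | h2
      · rw [seamLoopB, dif_pos (by omega)]
        rw [seamRef_small words head.toList Nn (by omega)]
      · rw [seamLoopB, dif_neg (by omega)]
        norm_num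
        have hs2 : (words[words.length - 2]?.getD "").toList ++ ' ' :: sfx words 1
            = sfx words 2 := by
          rw [← List.getD_eq_getElem?_getD, ← List.singleton_append, ← List.append_assoc]
          exact (sfx_succ words 1 (by omega) (by omega)).symm
        rw [hs2]
        have hmain := bLoop_eq words head.toList Nn hNL (Nn + 1 - 3) 3 0 (by omega) (by omega)
          (by omega) (fun m hm1 hm2 => by omega) (by rw [if_neg (by omega)])
        simpa using hmain
  rw [hA, hB]
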